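-- pv_equiv track=rewrite | github.com/jaimoondra/approximation-portfolios-for-rl | src/environments/natural_disaster.py | generate_valid_action
-- ===== SOURCE A (Python) =====
-- def generate_valid_action(state, action_space):
--     """
--     Filters the action space to only include actions that allocate to clusters with unmet need > 0.
--
--     Args:
--         state (tuple): Current state of unmet needs.
--         action_space (list): Precomputed feasible actions.
--
--     Returns:
--         list: Valid actions for the given state.
--     """
--     valid_actions = []
--     for action in action_space:
--         is_valid = True
--         for i in range(len(state)):
--             if state[i] == 0 and action[i] > 0:
--                 is_valid = False  # Invalid if allocating to a cluster with no unmet need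
--                 break
--         if is_valid:
--             valid_actions.append(action)
--     return valid_actions
-- ===== SOURCE B (Python) =====
-- def generate_valid_action(state, action_space):
--     """Inverts the loop nesting: iterate over state dimensions, and at each
--     zero-need dimension successively narrow the surviving action list."""
--     survivors = list(action_space)
--     for i, v in enumerate(state):
--         if v == 0:
--             survivors = [a for a in survivors if a[i] <= 0]
--     return survivors
-- ===== Notes on version B (the rewrite author's own statement) =====
-- stated objective: alternative
-- what changed: B inverts the loop nesting: it iterates over state dimensions outermost and, at each zero-need dimension, rebuilds the surviving action list by one filtering pass, instead of A's per-action inner scan over all dimensions.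
-- outside the precondition, e.g. on generate_valid_action((0, 0), [(5,)]): A returns [], B returns []
import Mathlib
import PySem

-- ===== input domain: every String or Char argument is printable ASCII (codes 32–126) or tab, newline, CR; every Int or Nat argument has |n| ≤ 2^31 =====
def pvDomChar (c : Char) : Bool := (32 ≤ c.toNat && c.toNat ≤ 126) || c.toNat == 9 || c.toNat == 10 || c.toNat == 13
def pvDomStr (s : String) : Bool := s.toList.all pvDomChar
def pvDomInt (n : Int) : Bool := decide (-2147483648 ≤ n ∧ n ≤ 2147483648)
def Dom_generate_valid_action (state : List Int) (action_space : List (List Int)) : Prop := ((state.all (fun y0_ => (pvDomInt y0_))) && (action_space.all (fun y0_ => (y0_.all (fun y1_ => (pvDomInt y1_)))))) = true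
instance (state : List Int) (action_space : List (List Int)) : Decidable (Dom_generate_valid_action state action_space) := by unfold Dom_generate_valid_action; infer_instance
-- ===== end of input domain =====

-- B inverts the loop nesting: it iterates over state dimensions and successively filters the
-- surviving action list at each zero-need dimension, instead of A's per-action inner scan.


-- ===== PORT A =====
-- inner loop: 'for i in range(len(state)): if state[i] == 0 and action[i] > 0: is_valid = False; break'
-- (action[i] raises IndexError when out of range — those inputs are excluded by Pre_;
-- the port returns false there so it stays total)
def innerA (state action : List Int) : List Nat → Bool
  | [] => true
  | i :: rest =>
      if state.getD i 0 == 0 then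
        match PySem.List.pyGet? action (i : Int) with
        | none => false
        | some v => if v > 0 then false else innerA state action rest
      else innerA state action rest

def generate_valid_action (state : List Int) (action_space : List (List Int)) : List (List Int) :=
  action_space.foldl
    (fun valid_actions action =>
      if innerA state action (List.range state.length) then valid_actions ++ [action]
      else valid_actions)
    []

-- ===== PORT B =====
-- survivors = list(action_space)
-- for i, v in enumerate(state):
--     if v == 0: survivors = [a for a in survivors if a[i] <= 0]
-- return survivors
-- (a[i] raises IndexError when out of range, excluded by Pre_; the port treats it as 0)
def generate_valid_action_alt (state : List Int) (action_space : List (List Int)) : List (List Int) :=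
  (PySem.List.enumerate state 0).foldl
    (fun survivors p =>
      if p.2 == 0 then
        survivors.filter (fun a => decide ((PySem.List.pyGet? a p.1).getD 0 ≤ 0))
      else survivors)
    action_space

-- ===== PRECONDITION & SPEC =====
-- Pre_ excludes the inputs on which Python A raises IndexError (an action shorter than some
-- zero position of the state); it also excludes inputs where A is rescued from that IndexError
-- by an earlier break — there both Pythons still return the same value (see the cite).
def Pre_generate_valid_action (state : List Int) (action_space : List (List Int)) : Prop :=
  ∀ action ∈ action_space, ∀ i ∈ List.range state.length, state.getD i 0 = 0 → i < action.length
instance (state : List Int) (action_space : List (List Int)) : Decidable (Pre_generate_valid_action state action_space) := by unfold Pre_generate_valid_action; infer_instance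

def pvWitness_generate_valid_action : List Int × List (List Int) :=
  ([0, 2, 0], [[0, 1, 0], [1, 0, 0], [0, 3, -1]])

def Spec_generate_valid_action (state : List Int) (action_space : List (List Int)) (out : List (List Int)) : Prop := out = generate_valid_action_alt state action_space
instance (state : List Int) (action_space : List (List Int)) (out : List (List Int)) : Decidable (Spec_generate_valid_action state action_space out) := by unfold Spec_generate_valid_action; infer_instance

-- ===== CLAIM (what is proved, stated in full; the proofs are below) =====
def Claim_equal_generate_valid_action : Prop := ∀ (state : List Int) (action_space : List (List Int)), Dom_generate_valid_action state action_space → Pre_generate_valid_action state action_space → Spec_generate_valid_action state action_space (generate_valid_action state action_space)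

-- ===== LEMMAS AND PROOFS =====

-- A's per-index test, factored out of the inner loop.
def pA (state action : List Int) (i : Nat) : Bool :=
  if state.getD i 0 == 0 then
    match PySem.List.pyGet? action (i : Int) with
    | none => false
    | some v => !(decide (v > 0))
  else true

theorem innerA_eq_all (state action : List Int) (L : List Nat) :
    innerA state action L = L.all (pA state action) := by
  induction L with
  | nil => rfl
  | cons i rest ih =>
    simp only [innerA, pA, List.all_cons]
    split
    · cases h : PySem.List.pyGet? action (i : Int) with
      | none => simp
      | some v =>
        by_cases hv : v > 0
        · simp [hv]
        · simp [hv, ih]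
    · simp [ih]

theorem all_congr_mem {α : Type} {l : List α} {p q : α → Bool}
    (h : ∀ x ∈ l, p x = q x) : l.all p = l.all q := by
  induction l with
  | nil => rfl
  | cons x xs ih =>
    simp only [List.all_cons, h x (List.mem_cons_self ..),
      ih (fun y hy => h y (List.mem_cons_of_mem _ hy))]

theorem all_if_eq_filter_all {α : Type} (l : List α) (c : α → Bool) (q : α → Bool) :
    l.all (fun i => if c i then q i else true) = (l.filter c).all q := by
  induction l with
  | nil => rfl
  | cons x xs ih =>
    by_cases h : c x = true
    · simp [h]
    · have h' : c x = false := by simpa using h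
      simp [h']

-- a fold that skips the elements failing c is a fold over the filtered list
theorem foldl_if_skip {α β : Type} (c : β → Bool) (f : α → β → α) (L : List β) (s : α) :
    L.foldl (fun s p => if c p then f s p else s) s = (L.filter c).foldl f s := by
  induction L generalizing s with
  | nil => rfl
  | cons x xs ih =>
    by_cases h : c x = true
    · simp [h, ih]
    · have h' : c x = false := by simpa using h
      simp [h', ih]

-- successive filtering passes amount to one filter by the conjunction of the tests
theorem foldl_filter_eq_filter_all {α β : Type} (q : β → α → Bool) (L : List β) (xs : List α) :
    L.foldl (fun s i => s.filter (q i)) xs = xs.filter (fun a => L.all (fun i => q i a)) := by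
  induction L generalizing xs with
  | nil => simp
  | cons i rest ih =>
    simp only [List.foldl_cons, ih, List.filter_filter]
    apply List.filter_congr
    intro a _
    simp [Bool.and_comm]

-- B's zero-index list is the filtered Nat range, cast to Int.
theorem zero_idx_eq (state : List Int) :
    ((PySem.List.enumerate state 0).filter (fun p => p.2 == 0)).map (·.1)
      = ((List.range state.length).filter (fun i => state.getD i 0 == 0)).map (fun i : Nat => (i : Int)) := by
  rw [PySem.List.enumerate_eq_map_pyRange (d := 0), PySem.List.len_eq,
    PySem.List.pyRange_zero_nat]
  simp [List.filter_map, List.map_map, Function.comp_def]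

-- B rewritten as one filter by the all-zero-indices test
theorem alt_eq_filter (state : List Int) (action_space : List (List Int)) :
    generate_valid_action_alt state action_space
      = action_space.filter (fun a =>
          (((PySem.List.enumerate state 0).filter (fun p => p.2 == 0)).map (·.1)).all
            (fun i => decide ((PySem.List.pyGet? a i).getD 0 ≤ 0))) := by
  unfold generate_valid_action_alt
  rw [show (PySem.List.enumerate state 0).foldl
        (fun survivors p =>
          if p.2 == 0 then
            survivors.filter (fun a => decide ((PySem.List.pyGet? a p.1).getD 0 ≤ 0))
          else survivors) action_space
      = ((PySem.List.enumerate state 0).filter (fun p => p.2 == 0)).foldl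
          (fun s p => s.filter (fun a => decide ((PySem.List.pyGet? a p.1).getD 0 ≤ 0))) action_space
    from foldl_if_skip _ _ _ _]
  rw [foldl_filter_eq_filter_all (fun (p : Int × Int) a => decide ((PySem.List.pyGet? a p.1).getD 0 ≤ 0))]
  apply List.filter_congr
  intro a _
  simp [List.all_map, Function.comp_def]

-- under Pre_'s per-action condition, A's inner loop equals B's combined test for that action
theorem inner_eq_alt_test (state action : List Int)
    (h : ∀ i ∈ List.range state.length, state.getD i 0 = 0 → i < action.length) :
    innerA state action (List.range state.length)
      = (((PySem.List.enumerate state 0).filter (fun p => p.2 == 0)).map (·.1)).all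
          (fun i => decide ((PySem.List.pyGet? action i).getD 0 ≤ 0)) := by
  rw [zero_idx_eq, innerA_eq_all, List.all_map]
  have hpA : ∀ i ∈ List.range state.length, pA state action i
      = (if (state.getD i 0 == 0) = true
          then (fun j : Nat => decide ((PySem.List.pyGet? action (j : Int)).getD 0 ≤ 0)) i
          else true) := by
    intro i hi
    by_cases hz : state.getD i 0 = 0
    · have hlt : i < action.length := h i hi hz
      have hc : (state.getD i 0 == 0) = true := by simpa using hz
      simp only [pA, hc, if_true]
      rw [PySem.List.pyGet?_natCast, List.getElem?_eq_getElem hlt]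
      simp only [Option.getD_some]
      rw [← decide_not, decide_eq_decide]
      omega
    · have hc : ¬ ((state.getD i 0 == 0) = true) := by simpa using hz
      simp only [pA, hc]
      rfl
  rw [all_congr_mem hpA, all_if_eq_filter_all]
  apply all_congr_mem
  intro i _
  rfl

-- ===== VERDICT (by name: the statement is the Claim_ definition above) =====
theorem generate_valid_action_spec : Claim_equal_generate_valid_action := by
  intro state action_space _ hpre
  unfold Spec_generate_valid_action generate_valid_action
  rw [PySem.List.foldl_append_if_eq_filter, List.nil_append, alt_eq_filter]
  apply List.filter_congr
  intro action ha
  exact inner_eq_alt_test state action (fun i hi hz => hpre action ha i hi hz)
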